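-- pv_equiv track=rewrite | github.com/sevenhe716/LeetCode | String/q401_binary_watch.py | readBinaryWatch1
-- ===== SOURCE A (Python) =====
-- def readBinaryWatch1(num: 'int') -> 'List[str]':
--     # 生成方式，位运算或者用字符串拼接
--     def generate_nums(n, max_num, bit_count, cur_num, cur_results, results):
--         if n == 0:
--             # results += [cur for cur in cur_results if cur < max_num]
--             if cur_results < max_num:
--                 results.append(cur_results)
--         else:
--             for i in range(cur_num, bit_count):
--                 # cur_results不是集合，而是单个数
--                 generate_nums(n - 1, max_num, bit_count, i + 1, cur_results + (1 << i), results)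
--                 # generate_nums(n - 1, max_num, bit_count, i + 1, [cur + (1 << i) for cur in cur_results], results)
--
--     ans = []
--     for hour_num in range(num + 1):
--         hours, minutes = [], []
--         generate_nums(hour_num, 12, 4, 0, 0, hours)
--         generate_nums(num - hour_num, 60, 6, 0, 0, minutes)
--         ans += [str(hour) + ':' + str(minute).zfill(2) for hour in hours for minute in minutes]
--     return ans
-- ===== SOURCE B (Python) =====
-- from itertools import combinations
--
--
-- def readBinaryWatch1(num: 'int') -> 'List[str]':
--     ans = []
--     for hour_num in range(num + 1):
--         # combinations(range(k), r) is empty for r > k; skip building it then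
--         hours = ([v for c in combinations(range(4), hour_num)
--                   for v in [sum(1 << i for i in c)] if v < 12]
--                  if hour_num <= 4 else [])
--         minutes = ([v for c in combinations(range(6), num - hour_num)
--                     for v in [sum(1 << i for i in c)] if v < 60]
--                    if num - hour_num <= 6 else [])
--         ans += [str(h) + ':' + str(m).zfill(2) for h in hours for m in minutes]
--     return ans
-- ===== Notes on version B (the rewrite author's own statement) =====
-- stated objective: idiomatic
-- what changed: Replaces the hand-written mutating backtracking recursion generate_nums by direct enumeration of LED bit-position subsets with itertools.combinations (same lexicographic order, so identical output), short-circuiting to [] when the LED count exceeds the number of bit positions.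
import Mathlib
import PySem

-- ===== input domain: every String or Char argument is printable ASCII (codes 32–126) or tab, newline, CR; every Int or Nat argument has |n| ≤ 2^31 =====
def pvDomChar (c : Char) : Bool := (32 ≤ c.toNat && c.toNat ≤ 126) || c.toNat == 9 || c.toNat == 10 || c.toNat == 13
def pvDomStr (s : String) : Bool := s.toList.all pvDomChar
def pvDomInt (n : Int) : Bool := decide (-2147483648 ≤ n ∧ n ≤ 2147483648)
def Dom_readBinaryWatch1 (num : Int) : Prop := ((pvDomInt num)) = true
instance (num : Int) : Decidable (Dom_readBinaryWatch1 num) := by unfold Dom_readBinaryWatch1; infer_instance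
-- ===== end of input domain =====

-- B replaces the mutating backtracking recursion by direct enumeration of LED bit-position
-- subsets (itertools.combinations), same output values and order; objective: idiomatic.

def pvShift1 (i : Int) : Int := (1 : Int) <<< i.toNat

-- ===== PORT A =====
-- generate_nums: the recursion parameter n is a nonnegative int at every call site
-- (hour_num ∈ range(num+1) and num - hour_num ≥ 0), carried here as the Nat fuel;
-- Python mutates `results`, the port returns the list of appended values and the
-- caller concatenates.  `1 << i` with i ≥ 0 (from range(cur_num, bit_count),
-- cur_num ≥ 0) is (1 : Int) <<< i.toNat, exact there.
def pvGenNumsA : Nat → Int → Int → Int → Int → List Int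
  | 0, maxNum, _, _, curResults =>
      if curResults < maxNum then [curResults] else []
  | n + 1, maxNum, bitCount, curNum, curResults =>
      (PySem.List.pyRange curNum bitCount 1).foldl
        (fun results i =>
          results ++ pvGenNumsA n maxNum bitCount (i + 1) (curResults + pvShift1 i))
        []

def readBinaryWatch1 (num : Int) : List String :=
  (PySem.List.pyRange 0 (num + 1) 1).foldl
    (fun ans hourNum =>
      let hours := pvGenNumsA hourNum.toNat 12 4 0 0
      let minutes := pvGenNumsA (num - hourNum).toNat 60 6 0 0
      ans ++ hours.flatMap (fun hour =>
        minutes.map (fun minute =>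
          PySem.Int.toStr hour ++ ":" ++ PySem.Str.zfill (PySem.Int.toStr minute) 2)))
    []

-- ===== PORT B =====
-- itertools.combinations(l, n) in its lexicographic order, as a structural recursion.
def pvCombs : Nat → List Int → List (List Int)
  | 0, _ => [[]]
  | _ + 1, [] => []
  | n + 1, x :: xs => (pvCombs n xs).map (x :: ·) ++ pvCombs (n + 1) xs

-- the comprehension [v for c in combinations(bits, n) for v in [sum(1 << i for i in c)] if v < maxNum];
-- in Source B it is short-circuited to [] when n exceeds the range length (combinations is empty then)
def pvLedVals (n : Nat) (bits : List Int) (maxNum : Int) : List Int :=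
  (pvCombs n bits).filterMap (fun c =>
    let v := (c.map pvShift1).sum
    if v < maxNum then some v else none)

def readBinaryWatch1_alt (num : Int) : List String :=
  (PySem.List.pyRange 0 (num + 1) 1).foldl
    (fun ans hourNum =>
      let hours := if hourNum ≤ 4 then pvLedVals hourNum.toNat (PySem.List.pyRange 0 4 1) 12 else []
      let minutes := if num - hourNum ≤ 6 then pvLedVals (num - hourNum).toNat (PySem.List.pyRange 0 6 1) 60 else []
      ans ++ hours.flatMap (fun h =>
        minutes.map (fun m =>
          PySem.Int.toStr h ++ ":" ++ PySem.Str.zfill (PySem.Int.toStr m) 2)))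
    []

-- ===== PRECONDITION & SPEC =====
def Spec_readBinaryWatch1 (num : Int) (out : List String) : Prop := out = readBinaryWatch1_alt num
instance (num : Int) (out : List String) : Decidable (Spec_readBinaryWatch1 num out) := by unfold Spec_readBinaryWatch1; infer_instance

-- ===== CLAIM (what is proved, stated in full; the proofs are below) =====
def Claim_equal_readBinaryWatch1 : Prop := ∀ (num : Int), Dom_readBinaryWatch1 num → Spec_readBinaryWatch1 num (readBinaryWatch1 num)

-- ===== LEMMAS AND PROOFS =====

-- A's recursion over ranges, recast as a structural recursion over the list of
-- remaining bit positions (proof intermediary between the two ports).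
def pvGenL (maxNum : Int) : Nat → List Int → Int → List Int
  | 0, _, v => if v < maxNum then [v] else []
  | _ + 1, [], _ => []
  | n + 1, x :: xs, v =>
      pvGenL maxNum n xs (v + pvShift1 x) ++ pvGenL maxNum (n + 1) xs v

theorem pvGenNumsA_eq_genL (M B : Int) :
    ∀ (n : Nat) (c v : Int), pvGenNumsA n M B c v = pvGenL M n (PySem.List.pyRange c B 1) v := by
  intro n
  induction n with
  | zero =>
    intro c v
    by_cases h : B ≤ c
    · simp [pvGenNumsA, pvGenL, PySem.List.pyRange_one_eq_nil h]
    · rw [PySem.List.pyRange_one_cons (by omega)]; simp [pvGenNumsA, pvGenL]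
  | succ n ih =>
    have main : ∀ (v : Int) (k : Nat) (c : Int), (B - c).toNat = k →
        pvGenNumsA (n + 1) M B c v = pvGenL M (n + 1) (PySem.List.pyRange c B 1) v := by
      intro v k
      induction k with
      | zero =>
        intro c hc
        have hBc : B ≤ c := by omega
        simp [pvGenNumsA, pvGenL, PySem.List.pyRange_one_eq_nil hBc]
      | succ k ihk =>
        intro c hc
        have hcB : c < B := by omega
        rw [PySem.List.pyRange_one_cons hcB]
        show (PySem.List.pyRange c B 1).foldl _ [] = _
        rw [PySem.List.pyRange_one_cons hcB]
        simp only [List.foldl_cons, List.nil_append]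
        rw [PySem.List.foldl_append_eq_flatMap]
        have h1 : pvGenNumsA n M B (c + 1) (v + pvShift1 c) =
            pvGenL M n (PySem.List.pyRange (c + 1) B 1) (v + pvShift1 c) := ih _ _
        have h2 : pvGenNumsA (n + 1) M B (c + 1) v =
            pvGenL M (n + 1) (PySem.List.pyRange (c + 1) B 1) v := ihk (c + 1) (by omega)
        have h2' : (PySem.List.pyRange (c + 1) B 1).flatMap
              (fun i => pvGenNumsA n M B (i + 1) (v + pvShift1 i)) =
            pvGenL M (n + 1) (PySem.List.pyRange (c + 1) B 1) v := by
          rw [← h2]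
          show _ = (PySem.List.pyRange (c + 1) B 1).foldl _ []
          rw [PySem.List.foldl_append_eq_flatMap]
          simp
        rw [h1, h2', pvGenL]
    intro c v
    exact main v (B - c).toNat c rfl

theorem pvGenL_eq_ledVals (M : Int) :
    ∀ (l : List Int) (n : Nat) (v : Int),
      pvGenL M n l v = (pvCombs n l).filterMap (fun c =>
        let s := v + (c.map pvShift1).sum
        if s < M then some s else none) := by
  intro l
  induction l with
  | nil =>
    intro n v
    cases n with
    | zero =>
      simp only [pvGenL, pvCombs, List.filterMap_cons, List.filterMap_nil, List.map_nil,
        List.sum_nil, add_zero]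
      by_cases h : v < M <;> simp [h]
    | succ n => simp [pvGenL, pvCombs]
  | cons x xs ih =>
    intro n v
    cases n with
    | zero =>
      simp only [pvGenL, pvCombs, List.filterMap_cons, List.filterMap_nil, List.map_nil,
        List.sum_nil, add_zero]
      by_cases h : v < M <;> simp [h]
    | succ n =>
      rw [pvGenL, pvCombs, List.filterMap_append, List.filterMap_map, ih, ih]
      congr 1
      apply List.filterMap_congr
      intro c _
      simp [Function.comp, add_assoc]

theorem pvGenNumsA_eq_ledVals (n : Nat) (M B : Int) :
    pvGenNumsA n M B 0 0 = pvLedVals n (PySem.List.pyRange 0 B 1) M := by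
  rw [pvGenNumsA_eq_genL, pvGenL_eq_ledVals, pvLedVals]
  simp

theorem pvCombs_eq_nil : ∀ (l : List Int) (n : Nat), l.length < n → pvCombs n l = [] := by
  intro l
  induction l with
  | nil => intro n h; match n, h with | m + 1, _ => rfl
  | cons x xs ih =>
    intro n h
    match n, h with
    | m + 1, h =>
      have h1 : xs.length < m := by simpa using h
      rw [pvCombs, ih m h1, ih (m + 1) (by omega)]
      rfl

theorem pvLedVals_eq_nil (n : Nat) (bits : List Int) (M : Int) (h : bits.length < n) :
    pvLedVals n bits M = [] := by
  rw [pvLedVals, pvCombs_eq_nil bits n h]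
  rfl

-- ===== VERDICT (by name: the statement is the Claim_ definition above) =====
theorem readBinaryWatch1_spec : Claim_equal_readBinaryWatch1 := by
  intro num _
  show readBinaryWatch1 num = readBinaryWatch1_alt num
  unfold readBinaryWatch1 readBinaryWatch1_alt
  apply PySem.List.foldl_congr_mem
  intro ans hourNum hmem
  have hge : 0 ≤ hourNum := ((PySem.List.mem_pyRange_one).1 hmem).1
  have hle : hourNum < num + 1 := ((PySem.List.mem_pyRange_one).1 hmem).2
  rw [pvGenNumsA_eq_ledVals, pvGenNumsA_eq_ledVals]
  by_cases h4 : hourNum ≤ 4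
  · by_cases h6 : num - hourNum ≤ 6
    · simp [h4, h6]
    · have : (PySem.List.pyRange 0 6 1).length < (num - hourNum).toNat := by
        simp [PySem.List.length_pyRange_one]; omega
      simp [h4, h6, pvLedVals_eq_nil _ _ _ this]
  · have : (PySem.List.pyRange 0 4 1).length < hourNum.toNat := by
      simp [PySem.List.length_pyRange_one]; omega
    simp [h4, pvLedVals_eq_nil _ _ _ this]
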